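-- pv_equiv track=rewrite | github.com/summersunshine1/textclassification | textclassification/selectfeature.py | getwordset
-- ===== SOURCE A (Python) =====
-- def getwordset(totalcw):
--     m = len(totalcw)
--     wordarr=set()
--     f = dict()
--     for i in range(m):
--         n=len(totalcw[i])
--         first = 0
--         flag = dict()
--         for j in range(n):
--             l = len(totalcw[i][j])
--             for k in range(l):
--                 word = totalcw[i][j][k]
--                 wordarr.add(word)
--                 if word in flag:
--                     continue
--                 flag[word]=1
--                 if not word in f:
--                     f[word]=1
--                 else:
--                     f[word]+=1
--     return wordarr,f
-- ===== SOURCE B (Python) =====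
-- def getwordset(totalcw):
--     # distinct words in first-occurrence order over the whole corpus
--     order = list(dict.fromkeys(w for sub in totalcw for doc in sub for w in doc))
--     # document frequency by direct counting: number of classes containing the word
--     f = {w: sum(1 for sub in totalcw if any(w in doc for doc in sub)) for w in order}
--     return set(order), f
-- ===== Notes on version B (the rewrite author's own statement) =====
-- stated objective: alternative
-- what changed: Replaces A's single interleaved triple loop (per-occurrence set.add plus a per-class flag dict driving incremental counter updates) with a two-phase query-style computation: first dedup the whole flattened corpus into the global word order, then build f by directly counting, for each word, how many classes contain it (transposed loops, no incremental dict updates).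
import Mathlib
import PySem

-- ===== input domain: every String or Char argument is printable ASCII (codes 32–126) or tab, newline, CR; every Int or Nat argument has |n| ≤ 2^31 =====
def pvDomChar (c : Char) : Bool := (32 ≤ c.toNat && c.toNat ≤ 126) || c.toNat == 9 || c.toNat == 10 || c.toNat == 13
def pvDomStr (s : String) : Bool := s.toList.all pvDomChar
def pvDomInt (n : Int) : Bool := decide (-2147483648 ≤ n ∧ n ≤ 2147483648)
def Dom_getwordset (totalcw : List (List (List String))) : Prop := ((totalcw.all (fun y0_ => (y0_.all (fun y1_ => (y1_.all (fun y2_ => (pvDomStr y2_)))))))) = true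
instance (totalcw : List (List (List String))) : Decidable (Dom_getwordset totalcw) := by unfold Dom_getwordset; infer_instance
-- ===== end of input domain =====

-- B replaces A's single interleaved per-occurrence loop (per-class flag dict driving
-- incremental counter updates) by a two-phase computation: dedup the whole flattened
-- corpus into the global word order, then directly count for each word how many classes
-- contain it. Objective: alternative (same results by a different algorithm).

-- ===== PORT A =====
-- A's innermost loop body: wordarr.add(word); if word in flag: continue; flag[word]=1; update f.
def pvAStep (st : PySem.Set String × PySem.Dict String Int × PySem.Dict String Int)
    (word : String) : PySem.Set String × PySem.Dict String Int × PySem.Dict String Int :=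
  let wordarr := PySem.Set.add st.1 word
  if st.2.2.contains word then (wordarr, st.2.1, st.2.2)
  else
    let flag := st.2.2.insert word 1
    let f := if st.2.1.contains word = false then st.2.1.insert word 1
             else st.2.1.insert word (st.2.1.getD word 0 + 1)
    (wordarr, f, flag)

-- A's body for one class (the i-th iteration of the outer loop)
def pvClassLoop (st : PySem.Set String × PySem.Dict String Int) (sub : List (List String)) :
    PySem.Set String × PySem.Dict String Int :=
  let n : Int := sub.length
  let inner := (PySem.List.pyRange 0 n 1).foldl
    (fun st2 j =>
      let doc := PySem.List.pyGetD sub j []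
      let l : Int := doc.length
      (PySem.List.pyRange 0 l 1).foldl
        (fun st3 k =>
          let word := PySem.List.pyGetD doc k ""
          pvAStep st3 word) st2) (st.1, st.2, PySem.Dict.empty)
  (inner.1, inner.2.1)

def getwordset (totalcw : List (List (List String))) : List String × (List (String × Int)) :=
  let m : Int := totalcw.length
  let res := (PySem.List.pyRange 0 m 1).foldl
    (fun st i => pvClassLoop st (PySem.List.pyGetD totalcw i []))
    ((PySem.Set.empty : PySem.Set String), (PySem.Dict.empty : PySem.Dict String Int))
  ((res.1 : List String), res.2.items)

-- ===== PORT B =====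
-- sum(1 for sub in totalcw if any(w in doc for doc in sub))
def pvCountClasses (totalcw : List (List (List String))) (w : String) : Int :=
  totalcw.foldl (fun acc sub => if sub.any (fun doc => doc.contains w) then acc + 1 else acc) 0

def getwordset_alt (totalcw : List (List (List String))) : List String × (List (String × Int)) :=
  let order := PySem.List.dedup (totalcw.flatMap (fun sub => sub.flatMap id))
  let f := order.foldl (fun d w => d.insert w (pvCountClasses totalcw w))
    (PySem.Dict.empty : PySem.Dict String Int)
  ((PySem.Set.ofList order : List String), f.items)

-- ===== PRECONDITION & SPEC =====
def Spec_getwordset (totalcw : List (List (List String))) (out : List String × (List (String × Int))) : Prop := out = getwordset_alt totalcw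
instance (totalcw : List (List (List String))) (out : List String × (List (String × Int))) : Decidable (Spec_getwordset totalcw out) := by unfold Spec_getwordset; infer_instance

-- ===== CLAIM (what is proved, stated in full; the proofs are below) =====
def Claim_equal_getwordset : Prop := ∀ (totalcw : List (List (List String))), Dom_getwordset totalcw → Spec_getwordset totalcw (getwordset totalcw)

-- ===== LEMMAS AND PROOFS =====

-- the words A's flag dict lets through, in order
def pvNewWords (flag : PySem.Dict String Int) : List String → List String
  | [] => []
  | w :: t => if flag.contains w then pvNewWords flag t
              else w :: pvNewWords (flag.insert w 1) t

theorem pvAStep_fst (ws : List String)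
    (st : PySem.Set String × PySem.Dict String Int × PySem.Dict String Int) :
    (ws.foldl pvAStep st).1 = PySem.Set.update st.1 ws := by
  induction ws generalizing st with
  | nil => rfl
  | cons w t ih =>
    simp only [List.foldl_cons]
    rw [ih]
    simp only [pvAStep, PySem.Set.update]
    split <;> rfl

theorem pvAStep_snd (ws : List String)
    (st : PySem.Set String × PySem.Dict String Int × PySem.Dict String Int) :
    (ws.foldl pvAStep st).2.1
      = (pvNewWords st.2.2 ws).foldl (fun f w => f.insert w (f.getD w 0 + 1)) st.2.1 := by
  induction ws generalizing st with
  | nil => rfl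
  | cons w t ih =>
    simp only [List.foldl_cons, pvNewWords]
    by_cases h : st.2.2.contains w
    · rw [if_pos h]
      have : pvAStep st w = (PySem.Set.add st.1 w, st.2.1, st.2.2) := by
        simp [pvAStep, h]
      rw [this, ih]
    · rw [if_neg h]
      simp only [Bool.not_eq_true] at h
      have hstep : pvAStep st w
          = (PySem.Set.add st.1 w, st.2.1.insert w (st.2.1.getD w 0 + 1), st.2.2.insert w 1) := by
        by_cases hf : st.2.1.contains w
        · simp [pvAStep, h, hf]
        · simp only [Bool.not_eq_true] at hf
          simp [pvAStep, h, hf, PySem.Dict.getD_of_not_contains _ _ hf]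
      rw [hstep, ih]
      simp

theorem pvUpdate_newWords (ws : List String) (flag : PySem.Dict String Int)
    (s : PySem.Set String) (h : ∀ w, flag.contains w = true ↔ w ∈ s) :
    PySem.Set.update s ws = s ++ pvNewWords flag ws := by
  induction ws generalizing flag s with
  | nil => simp [PySem.Set.update, pvNewWords]
  | cons w t ih =>
    simp only [pvNewWords]
    by_cases hc : flag.contains w
    · have hw : w ∈ s := (h w).mp hc
      rw [if_pos hc]
      have hu : PySem.Set.update s (w :: t) = PySem.Set.update s t := by
        simp [PySem.Set.update, PySem.Set.add_of_mem hw]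
      rw [hu, ih flag s h]
    · have hw : w ∉ s := fun hm => hc ((h w).mpr hm)
      rw [if_neg hc]
      have hstep : PySem.Set.update s (w :: t) = PySem.Set.update (s ++ [w]) t := by
        simp [PySem.Set.update, PySem.Set.add_of_not_mem hw]
      rw [hstep, ih (flag.insert w 1) (s ++ [w])]
      · simp
      · intro w'
        rw [PySem.Dict.contains_insert]
        simp only [List.mem_append, List.mem_singleton, Bool.or_eq_true, beq_iff_eq]
        rw [h w']
        tauto

theorem pvNewWords_empty (ws : List String) :
    pvNewWords PySem.Dict.empty ws = PySem.Set.ofList ws := by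
  have h := pvUpdate_newWords ws PySem.Dict.empty []
    (by intro w; simp [PySem.Dict.contains_empty])
  simpa [PySem.Set.ofList_eq_foldl, PySem.Set.update] using h.symm

theorem pvUpdate_foldl_add (xs : List String) (a s : PySem.Set String) :
    PySem.Set.update s (List.foldl PySem.Set.add a xs)
      = PySem.Set.update (PySem.Set.update s a) xs := by
  induction xs generalizing a s with
  | nil => rfl
  | cons x t ih =>
    simp only [List.foldl_cons]
    rw [ih]
    have key : PySem.Set.update s (PySem.Set.add a x)
        = PySem.Set.add (PySem.Set.update s a) x := by
      by_cases hx : x ∈ a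
      · rw [PySem.Set.add_of_mem hx, PySem.Set.add_of_mem
          ((PySem.Set.mem_update s a x).mpr (Or.inr hx))]
      · rw [PySem.Set.add_of_not_mem hx]
        show List.foldl PySem.Set.add s (a ++ [x]) = _
        rw [List.foldl_append]
        rfl
    rw [key]
    rfl

theorem pvUpdate_ofList (xs : List String) (s : PySem.Set String) :
    PySem.Set.update s (PySem.Set.ofList xs) = PySem.Set.update s xs := by
  rw [PySem.Set.ofList_eq_foldl, pvUpdate_foldl_add]
  rfl

-- A's whole per-class step: dedup the class's words, union them in, count them
theorem pvClassStep (sub : List (List String)) (st : PySem.Set String × PySem.Dict String Int) :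
    (((sub.foldl (fun st2 doc => doc.foldl pvAStep st2) (st.1, st.2, PySem.Dict.empty)).1,
      (sub.foldl (fun st2 doc => doc.foldl pvAStep st2) (st.1, st.2, PySem.Dict.empty)).2.1)
        : PySem.Set String × PySem.Dict String Int)
    = (PySem.Set.update st.1 (PySem.List.dedup (sub.flatMap id)),
       (PySem.List.dedup (sub.flatMap id)).foldl (fun f w => f.insert w (f.getD w 0 + 1)) st.2) := by
  have hflat : sub.foldl (fun st2 doc => doc.foldl pvAStep st2) (st.1, st.2, PySem.Dict.empty)
      = (sub.flatMap id).foldl pvAStep (st.1, st.2, PySem.Dict.empty) := by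
    rw [List.flatMap_id, ← List.foldl_flatten]
  rw [hflat]
  refine Prod.ext ?_ ?_
  · rw [pvAStep_fst]
    simp [PySem.List.dedup_eq_ofList, pvUpdate_ofList]
  · rw [pvAStep_snd]
    simp [PySem.List.dedup_eq_ofList, pvNewWords_empty]

-- A's per-class step as a function (the shape pvClassLoop reduces to)
def pvA1 (st : PySem.Set String × PySem.Dict String Int) (sub : List (List String)) :
    PySem.Set String × PySem.Dict String Int :=
  (PySem.Set.update st.1 (PySem.List.dedup (sub.flatMap id)),
   (PySem.List.dedup (sub.flatMap id)).foldl (fun f w => f.insert w (f.getD w 0 + 1)) st.2)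

theorem pvClassLoop_eq (st : PySem.Set String × PySem.Dict String Int)
    (sub : List (List String)) : pvClassLoop st sub = pvA1 st sub := by
  unfold pvClassLoop
  simp only [PySem.List.foldl_pyRange_zero_pyGetD']
  exact pvClassStep sub st

-- invariant 1: the word set accumulates the flattened corpus
theorem pvInv_fst (cs : List (List (List String)))
    (st : PySem.Set String × PySem.Dict String Int) :
    (cs.foldl pvA1 st).1 = PySem.Set.update st.1 (cs.flatMap (fun sub => sub.flatMap id)) := by
  induction cs generalizing st with
  | nil => simp [PySem.Set.update]
  | cons c t ih =>
    simp only [List.foldl_cons, List.flatMap_cons]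
    rw [ih]
    show PySem.Set.update (PySem.Set.update st.1 (PySem.List.dedup (c.flatMap id))) _ = _
    rw [PySem.List.dedup_eq_ofList, pvUpdate_ofList, ← PySem.Set.update_append]

-- invariant 2: the counter's keys accumulate the flattened corpus in the same order
theorem pvInv_keys (cs : List (List (List String)))
    (st : PySem.Set String × PySem.Dict String Int) :
    (cs.foldl pvA1 st).2.keys
      = PySem.Set.update st.2.keys (cs.flatMap (fun sub => sub.flatMap id)) := by
  induction cs generalizing st with
  | nil => simp [PySem.Set.update]
  | cons c t ih =>
    simp only [List.foldl_cons, List.flatMap_cons]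
    rw [ih]
    show PySem.Set.update ((PySem.List.dedup (c.flatMap id)).foldl
        (fun f w => f.insert w (f.getD w 0 + 1)) st.2).keys _ = _
    rw [PySem.Dict.keys_foldl_insert, PySem.List.dedup_eq_ofList, pvUpdate_ofList,
      ← PySem.Set.update_append]

-- invariant 3: the counter's keys stay Nodup
theorem pvInv_nodup (cs : List (List (List String)))
    (st : PySem.Set String × PySem.Dict String Int) (h : st.2.keys.Nodup) :
    (cs.foldl pvA1 st).2.keys.Nodup := by
  induction cs generalizing st with
  | nil => exact h
  | cons c t ih =>
    simp only [List.foldl_cons]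
    exact ih _ (PySem.Dict.nodup_keys_foldl_insert _ _ _ h)

-- invariant 4: each word's count grows by the number of classes containing it
theorem pvInv_getD (cs : List (List (List String)))
    (st : PySem.Set String × PySem.Dict String Int) (w : String) :
    (cs.foldl pvA1 st).2.getD w 0
      = st.2.getD w 0
        + ((cs.countP (fun sub => sub.any (fun doc => doc.contains w))) : Int) := by
  induction cs generalizing st with
  | nil => simp
  | cons c t ih =>
    simp only [List.foldl_cons]
    rw [ih]
    have hstep : (pvA1 st c).2.getD w 0
        = st.2.getD w 0 + (((PySem.List.dedup (c.flatMap id)).count w : Nat) : Int) := by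
      show ((PySem.List.dedup (c.flatMap id)).foldl
          (fun f w => f.insert w (f.getD w 0 + 1)) st.2).getD w 0 = _
      rw [PySem.Dict.getD_foldl_insert_add_one]
    have hmem : w ∈ PySem.List.dedup (c.flatMap id)
        ↔ (c.any (fun doc => doc.contains w)) = true := by
      rw [PySem.List.dedup_eq_ofList, PySem.Set.mem_ofList]
      simp [List.any_eq_true]
    have hcount : (((PySem.List.dedup (c.flatMap id)).count w : Nat) : Int)
        = if (c.any (fun doc => doc.contains w)) = true then (1 : Int) else 0 := by
      by_cases hw : w ∈ PySem.List.dedup (c.flatMap id)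
      · rw [if_pos (hmem.mp hw)]
        have hnd : (PySem.List.dedup (c.flatMap id)).Nodup := by
          rw [PySem.List.dedup_eq_ofList]; exact PySem.Set.nodup_ofList _
        rw [List.count_eq_one_of_mem hnd hw]; rfl
      · rw [if_neg (fun hc => hw (hmem.mpr hc)), List.count_eq_zero.mpr hw]; rfl
    rw [hstep, hcount, List.countP_cons]
    by_cases hc : (c.any (fun doc => doc.contains w)) = true
    · simp only [hc, if_true]; push_cast; ring
    · simp only [hc]; push_cast; ring

-- B's counting loop is the same countP
theorem pvCountClasses_eq (totalcw : List (List (List String))) (w : String) :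
    pvCountClasses totalcw w
      = ((totalcw.countP (fun sub => sub.any (fun doc => doc.contains w))) : Int) := by
  unfold pvCountClasses
  rw [PySem.List.foldl_count_if]
  ring

-- ===== VERDICT (by name: the statement is the Claim_ definition above) =====
theorem getwordset_spec : Claim_equal_getwordset := by
  intro totalcw _
  show getwordset totalcw = getwordset_alt totalcw
  unfold getwordset getwordset_alt
  simp only [PySem.List.foldl_pyRange_zero_pyGetD']
  rw [show pvClassLoop = pvA1 from funext fun st => funext fun sub => pvClassLoop_eq st sub]
  have hflat2 : PySem.List.dedup (totalcw.flatMap (fun sub => sub.flatMap id))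
      = PySem.Set.ofList (totalcw.flatMap (fun sub => sub.flatMap id)) :=
    PySem.List.dedup_eq_ofList _
  have hfst : (totalcw.foldl pvA1 ((PySem.Set.empty : PySem.Set String),
      (PySem.Dict.empty : PySem.Dict String Int))).1
      = PySem.Set.ofList (totalcw.flatMap (fun sub => sub.flatMap id)) := by
    rw [pvInv_fst]; rfl
  have hkeys : (totalcw.foldl pvA1 ((PySem.Set.empty : PySem.Set String),
      (PySem.Dict.empty : PySem.Dict String Int))).2.keys
      = PySem.Set.ofList (totalcw.flatMap (fun sub => sub.flatMap id)) := by
    rw [pvInv_keys]; rfl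
  have hnd : (totalcw.foldl pvA1 ((PySem.Set.empty : PySem.Set String),
      (PySem.Dict.empty : PySem.Dict String Int))).2.keys.Nodup := by
    apply pvInv_nodup
    simp [PySem.Dict.keys_empty]
  refine Prod.ext ?_ ?_
  · simp only [hfst, hflat2, PySem.Set.ofList_ofList]
  · rw [PySem.Dict.items_eq_map_keys _ hnd 0, hkeys,
      PySem.Dict.items_foldl_insert_fresh
        (PySem.List.dedup (totalcw.flatMap (fun sub => sub.flatMap id)))
        (fun w => w) (fun w => pvCountClasses totalcw w) PySem.Dict.empty
        (fun a _ => PySem.Dict.contains_empty a)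
        (by rw [List.map_id_fun', hflat2]; exact PySem.Set.nodup_ofList _)]
    simp only [PySem.Dict.empty, List.nil_append, hflat2]
    apply List.map_congr_left
    intro a _
    rw [pvInv_getD, pvCountClasses_eq]
    simp [PySem.Dict.getD, PySem.Dict.get?]
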